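-- pv_equiv track=rewrite | github.com/Nadock/advent_of_code | aoc_2024/day_9/day_9.py | find_freespace
-- ===== SOURCE A (Python) =====
-- def find_freespace(drive: list[str]) -> list[tuple[int, int]]:
--     """Find all of the free space in pairs of (start_idx, size)."""
--     idx = 0
--     free = []
--     while idx < len(drive):
--         if drive[idx] == ".":
--             count = 0
--             for c in drive[idx:]:
--                 if c != ".":
--                     break
--                 count += 1
--             free.append((idx, count))
--             idx += count
--         else:
--             idx += 1
--     free.sort(key=lambda s: s[0])
--     return free
-- ===== SOURCE B (Python) =====
-- def find_freespace(drive: list[str]) -> list[tuple[int, int]]: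
--     """Find all of the free space in pairs of (start_idx, size)."""
--     free = []
--     start = -1
--     for i, c in enumerate(drive):
--         if c == ".":
--             if start < 0:
--                 start = i
--         elif start >= 0:
--             free.append((start, i - start))
--             start = -1
--     if start >= 0:
--         free.append((start, len(drive) - start))
--     return free
-- ===== Notes on version B (the rewrite author's own statement) =====
-- stated objective: faster
-- what changed: Replaces the while loop that re-slices drive[idx:] and scans each run twice with a single enumerate pass tracking the current dot-run start, and drops the final sort (output is emitted in increasing order).
import Mathlib
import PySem

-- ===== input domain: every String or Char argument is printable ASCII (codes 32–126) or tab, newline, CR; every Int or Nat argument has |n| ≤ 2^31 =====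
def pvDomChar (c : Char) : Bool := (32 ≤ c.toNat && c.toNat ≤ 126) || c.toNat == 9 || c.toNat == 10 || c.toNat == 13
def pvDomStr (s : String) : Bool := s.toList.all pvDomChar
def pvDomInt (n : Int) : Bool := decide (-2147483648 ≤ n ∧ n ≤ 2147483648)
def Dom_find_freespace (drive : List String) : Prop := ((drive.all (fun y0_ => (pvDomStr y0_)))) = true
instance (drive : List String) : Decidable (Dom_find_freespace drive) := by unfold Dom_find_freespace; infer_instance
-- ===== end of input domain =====

-- B replaces A's while-loop (which re-slices drive[idx:] to measure each dot run, then sorts)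
-- by one enumerate pass tracking the current dot-run start; return values proved equal on all inputs.

-- ===== PORT A =====
-- inner `for c in drive[idx:]: if c != ".": break; count += 1`
def pvCountDots : List String → Int
  | [] => 0
  | c :: rest => if c ≠ "." then 0 else pvCountDots rest + 1

-- needed by pvLoopA's termination proof (count ≥ 1 on a dot)
lemma pvCountDots_nonneg : ∀ (l : List String), 0 ≤ pvCountDots l := by
  intro l
  induction l with
  | nil => simp [pvCountDots]
  | cons c rest ih =>
    by_cases h : c = "."
    · simp [pvCountDots, h]
      omega
    · simp [pvCountDots, h]

-- the `while idx < len(drive): …` loop, with `free` the accumulator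
def pvLoopA (drive : List String) (idx : Nat) (free : List (Int × Int)) : List (Int × Int) :=
  if h : idx < drive.length then
    if hdot : drive[idx] == "." then
      pvLoopA drive (idx + (pvCountDots (PySem.List.slice drive (some (idx : Int)) none)).toNat)
        (free ++ [((idx : Int), pvCountDots (PySem.List.slice drive (some (idx : Int)) none))])
    else
      pvLoopA drive (idx + 1) free
  else free
termination_by drive.length - idx
decreasing_by
  · have hs : PySem.List.slice drive (some (idx : Int)) none = drive.drop idx :=
      PySem.List.slice_from_natCast ..
    have h1 : 1 ≤ pvCountDots (PySem.List.slice drive (some (idx : Int)) none) := by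
      rw [hs, ← List.getElem_cons_drop h]
      have hd : drive[idx] = "." := by simpa using hdot
      have := pvCountDots_nonneg (drive.drop (idx + 1))
      simp [pvCountDots, hd]
      omega
    omega
  · omega

def find_freespace (drive : List String) : List (Int × Int) :=
  PySem.List.sorted (pvLoopA drive 0 []) (fun s => s.1)

-- ===== PORT B =====
-- the `for i, c in enumerate(drive)` loop; n = len(drive), used by the final flush
def pvLoopB (n : Int) : List String → Int → Int → List (Int × Int) → List (Int × Int)
  | [], _, start, free => if start ≥ 0 then free ++ [(start, n - start)] else free
  | c :: rest, i, start, free =>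
    if c == "." then
      pvLoopB n rest (i + 1) (if start < 0 then i else start) free
    else
      if start ≥ 0 then pvLoopB n rest (i + 1) (-1) (free ++ [(start, i - start)])
      else pvLoopB n rest (i + 1) (-1) free

def find_freespace_alt (drive : List String) : List (Int × Int) :=
  pvLoopB (drive.length : Int) drive 0 (-1) []

-- ===== PRECONDITION & SPEC =====
def Spec_find_freespace (drive : List String) (out : List (Int × Int)) : Prop := out = find_freespace_alt drive
instance (drive : List String) (out : List (Int × Int)) : Decidable (Spec_find_freespace drive out) := by unfold Spec_find_freespace; infer_instance

-- ===== CLAIM (what is proved, stated in full; the proofs are below) =====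
def Claim_equal_find_freespace : Prop := ∀ (drive : List String), Dom_find_freespace drive → Spec_find_freespace drive (find_freespace drive)

-- ===== LEMMAS AND PROOFS =====

lemma pvCountDots_eq_takeWhile : ∀ (l : List String),
    pvCountDots l = ((l.takeWhile (fun s => s == ".")).length : Int) := by
  intro l
  induction l with
  | nil => simp [pvCountDots]
  | cons c rest ih =>
    by_cases h : c = "." <;> simp [pvCountDots, h, ih]

lemma takeWhile_dots_eq_replicate : ∀ (l : List String),
    l.takeWhile (fun s => s == ".") =
      List.replicate (l.takeWhile (fun s => s == ".")).length "." := by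
  intro l
  induction l with
  | nil => rfl
  | cons c rest ih =>
    by_cases h : c = "."
    · rw [List.takeWhile_cons]
      simp only [h, beq_self_eq_true, if_pos]
      simp [List.replicate_succ, ← ih]
    · rw [List.takeWhile_cons]
      simp [h]

lemma dropWhile_dots_head_ne : ∀ (l : List String) (c : String) (rest : List String),
    l.dropWhile (fun s => s == ".") = c :: rest → c ≠ "." := by
  intro l
  induction l with
  | nil => intro c rest h; simp at h
  | cons a t ih =>
    intro c rest h
    rw [List.dropWhile_cons] at h
    by_cases ha : a = "."
    · simp only [ha, beq_self_eq_true, if_pos] at h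
      exact ih c rest h
    · rw [if_neg (by simpa using ha)] at h
      injection h with h1 _
      rw [← h1]
      exact ha

-- processing a block of dots with the run already open (start ≥ 0) just advances i
lemma pvLoopB_dots (n : Int) : ∀ (k : Nat) (rest : List String) (i s : Int)
    (free : List (Int × Int)), 0 ≤ s →
    pvLoopB n (List.replicate k "." ++ rest) i s free = pvLoopB n rest (i + (k : Int)) s free := by
  intro k
  induction k with
  | zero => intro rest i s free _; simp
  | succ k ih =>
    intro rest i s free hs
    rw [List.replicate_succ, List.cons_append]
    simp only [pvLoopB, beq_self_eq_true, if_pos]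
    rw [if_neg (by omega)]
    rw [ih rest (i + 1) s free hs]
    congr 1
    push_cast
    ring

-- the core correspondence: A's while-loop from idx equals B's pass over the suffix with no open run
lemma pvLoopA_eq_pvLoopB (drive : List String) : ∀ (m idx : Nat) (free : List (Int × Int)),
    drive.length - idx ≤ m →
    pvLoopA drive idx free =
      pvLoopB (drive.length : Int) (drive.drop idx) (idx : Int) (-1) free := by
  intro m
  induction m with
  | zero =>
    intro idx free hm
    have hge : drive.length ≤ idx := by omega
    rw [pvLoopA]
    rw [dif_neg (by omega)]
    rw [List.drop_eq_nil_of_le hge]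
    simp [pvLoopB]
  | succ m ih =>
    intro idx free hm
    by_cases h : idx < drive.length
    · have hd : drive[idx] :: drive.drop (idx + 1) = drive.drop idx := List.getElem_cons_drop h
      by_cases hdot : drive[idx] = "."
      · -- dot run of length k starting at idx
        obtain ⟨k, hkdef⟩ : ∃ kk,
            ((drive.drop idx).takeWhile (fun s => s == ".")).length = kk := ⟨_, rfl⟩
        have hs : PySem.List.slice drive (some (idx : Int)) none = drive.drop idx :=
          PySem.List.slice_from_natCast ..
        have hcount : pvCountDots (PySem.List.slice drive (some (idx : Int)) none) = (k : Int) := by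
          rw [hs, pvCountDots_eq_takeWhile, hkdef]
        have hrep : (drive.drop idx).takeWhile (fun s => s == ".") = List.replicate k "." := by
          rw [← hkdef]
          exact takeWhile_dots_eq_replicate _
        have hsplit : List.replicate k "." ++ (drive.drop idx).dropWhile (fun s => s == ".") =
            drive.drop idx := by
          rw [← hrep]; exact List.takeWhile_append_dropWhile
        have hk1 : 1 ≤ k := by
          rw [← hkdef, ← hd, List.takeWhile_cons]
          simp [hdot]
        have hkle : idx + k ≤ drive.length := by
          have h1 : k ≤ (drive.drop idx).length := by
            rw [← hkdef]
            exact (List.takeWhile_sublist _).length_le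
          rw [List.length_drop] at h1
          omega
        have hdropk : drive.drop (idx + k) = (drive.drop idx).dropWhile (fun s => s == ".") := by
          conv_lhs => rw [← List.drop_drop, ← hsplit]
          rw [List.drop_left' (List.length_replicate ..)]
        -- step A
        rw [pvLoopA]
        rw [dif_pos h, dif_pos (by simp [hdot])]
        rw [hcount, Int.toNat_natCast]
        rw [ih (idx + k) (free ++ [((idx : Int), (k : Int))]) (by omega)]
        rw [hdropk]
        -- step B: open the run at idx, cross the k dots
        obtain ⟨kk, rfl⟩ : ∃ kk, k = kk + 1 := ⟨k - 1, by omega⟩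
        conv_rhs => rw [← hsplit, List.replicate_succ, List.cons_append]
        simp only [pvLoopB, beq_self_eq_true, if_pos]
        rw [if_pos (by norm_num : (-1 : Int) < 0)]
        rw [pvLoopB_dots _ kk _ _ _ _ (by positivity)]
        cases hrest : (drive.drop idx).dropWhile (fun s => s == ".") with
        | nil =>
          -- the dots run to the end of the drive: n - idx = k
          have hlen : drive.length = idx + (kk + 1) := by
            have hl := congrArg List.length hsplit
            rw [hrest] at hl
            simp [List.length_drop] at hl
            omega
          simp only [pvLoopB]
          rw [if_neg (by norm_num : ¬ (-1 : Int) ≥ 0), if_pos (by positivity : (idx : Int) ≥ 0)]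
          rw [show ((kk + 1 : Nat) : Int) = (drive.length : Int) - (idx : Int) by
            push_cast [hlen]; ring]
        | cons c rest' =>
          have hc : ¬ (c = ".") := dropWhile_dots_head_ne _ _ _ hrest
          have hcb : ¬ ((c == ".") = true) := by simpa using hc
          simp only [pvLoopB]
          rw [if_neg hcb, if_neg hcb]
          rw [if_neg (by norm_num : ¬ (-1 : Int) ≥ 0), if_pos (by positivity : (idx : Int) ≥ 0)]
          rw [show ((idx + (kk + 1) : Nat) : Int) + 1 = (idx : Int) + 1 + (kk : Int) + 1 by
            push_cast; ring]
          rw [show (idx : Int) + 1 + (kk : Int) - (idx : Int) = ((kk + 1 : Nat) : Int) by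
            push_cast; ring]
      · -- no dot at idx: both sides just step to idx + 1
        rw [pvLoopA]
        rw [dif_pos h, dif_neg (by simp [hdot])]
        rw [ih (idx + 1) free (by omega)]
        rw [← hd]
        have hcb : ¬ ((drive[idx] == ".") = true) := by simpa using hdot
        simp only [pvLoopB]
        rw [if_neg hcb]
        rw [if_neg (by norm_num : ¬ (-1 : Int) ≥ 0)]
        rw [show ((idx + 1 : Nat) : Int) = (idx : Int) + 1 by push_cast; ring]
    · have hge : drive.length ≤ idx := by omega
      rw [pvLoopA]
      rw [dif_neg (by omega)]
      rw [List.drop_eq_nil_of_le hge]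
      simp [pvLoopB]

-- A's accumulator stays sorted by start index, so the final sort is the identity
lemma pvLoopA_pairwise (drive : List String) : ∀ (m idx : Nat) (free : List (Int × Int)),
    drive.length - idx ≤ m →
    (∀ p ∈ free, p.1 < (idx : Int)) →
    free.Pairwise (fun a b => a.1 ≤ b.1) →
    (pvLoopA drive idx free).Pairwise (fun a b => a.1 ≤ b.1) := by
  intro m
  induction m with
  | zero =>
    intro idx free hm _ hp
    rw [pvLoopA, dif_neg (by omega)]
    exact hp
  | succ m ih =>
    intro idx free hm hb hp
    by_cases h : idx < drive.length
    · by_cases hdot : drive[idx] = "."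
      · have hs : PySem.List.slice drive (some (idx : Int)) none = drive.drop idx :=
          PySem.List.slice_from_natCast ..
        have h1 : 1 ≤ pvCountDots (PySem.List.slice drive (some (idx : Int)) none) := by
          rw [hs, ← List.getElem_cons_drop h]
          have := pvCountDots_nonneg (drive.drop (idx + 1))
          simp [pvCountDots, hdot]
          omega
        rw [pvLoopA, dif_pos h, dif_pos (by simp [hdot])]
        apply ih
        · omega
        · intro p hpm
          rcases List.mem_append.1 hpm with hpf | hpe
          · have := hb p hpf
            have h2 : 1 ≤ (pvCountDots (PySem.List.slice drive (some (idx : Int)) none)).toNat := by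
              omega
            push_cast
            omega
          · simp only [List.mem_singleton] at hpe
            subst hpe
            have h2 : 1 ≤ (pvCountDots (PySem.List.slice drive (some (idx : Int)) none)).toNat := by
              omega
            show (idx : Int) < _
            push_cast
            omega
        · rw [List.pairwise_append]
          refine ⟨hp, by simp, ?_⟩
          intro a ha b hbm
          simp only [List.mem_singleton] at hbm
          subst hbm
          exact le_of_lt (hb a ha)
      · rw [pvLoopA, dif_pos h, dif_neg (by simp [hdot])]
        apply ih _ _ (by omega) _ hp
        intro p hpf
        have := hb p hpf
        push_cast
        omega
    · rw [pvLoopA, dif_neg (by omega)]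
      exact hp

-- ===== VERDICT (by name: the statement is the Claim_ definition above) =====
theorem find_freespace_spec : Claim_equal_find_freespace := by
  intro drive _
  unfold Spec_find_freespace find_freespace find_freespace_alt
  have hp : (pvLoopA drive 0 []).Pairwise (fun a b => a.1 ≤ b.1) :=
    pvLoopA_pairwise drive drive.length 0 [] (by omega) (by simp) (by simp)
  rw [PySem.List.sorted_eq_self_of_pairwise _ _ hp]
  have := pvLoopA_eq_pvLoopB drive drive.length 0 [] (by omega)
  simpa using this
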